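-- pv_equiv track=rewrite | github.com/GunaKanumuri/Ayana-bot | seed_family.py | _phone
-- ===== SOURCE A (Python) =====
-- def _phone(raw: str) -> str:
--     """Normalise to E.164 — strips spaces/dashes, preserves all digits."""
--     cleaned = ""
--     for ch in raw.strip():
--         if ch == "+" and not cleaned:
--             cleaned += ch
--         elif ch.isdigit():
--             cleaned += ch
--     # Add +91 if no country code (bare 10-digit number)
--     if not cleaned.startswith("+"):
--         cleaned = "+91" + cleaned if len(cleaned) == 10 else "+" + cleaned
--     return cleaned
-- ===== SOURCE B (Python) =====
-- def _phone(raw: str) -> str: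
--     """Normalise to E.164 — two separate passes: collect digits, detect a leading '+'."""
--     s = raw.strip()
--     digits = ''.join(c for c in s if c.isdigit())
--     has_plus = False
--     for c in s:
--         if c.isdigit() or c == '+':
--             has_plus = (c == '+')
--             break
--     if has_plus:
--         return '+' + digits
--     return '+91' + digits if len(digits) == 10 else '+' + digits
-- ===== Notes on version B (the rewrite author's own statement) =====
-- stated objective: simpler
-- what changed: Replaces A's single interleaved loop with stateful plus-only-while-empty accumulation by two purpose-separated passes: a digit filter and a scan for whether the first significant character is the plus sign, plus a direct three-way return.
import Mathlib
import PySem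

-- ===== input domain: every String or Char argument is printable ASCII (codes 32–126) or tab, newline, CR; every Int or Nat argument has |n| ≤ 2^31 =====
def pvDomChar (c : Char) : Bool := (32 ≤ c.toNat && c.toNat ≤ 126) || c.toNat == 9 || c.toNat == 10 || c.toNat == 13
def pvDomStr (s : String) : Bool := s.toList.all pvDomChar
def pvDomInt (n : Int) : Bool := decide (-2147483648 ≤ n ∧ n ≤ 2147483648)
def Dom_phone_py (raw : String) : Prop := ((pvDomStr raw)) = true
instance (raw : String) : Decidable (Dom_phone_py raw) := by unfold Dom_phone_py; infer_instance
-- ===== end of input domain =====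

-- B replaces A's interleaved loop (plus sign kept only while nothing was collected) by two
-- purpose-separated passes: a digit filter and a first-significant-character scan; return value only.

-- ===== PORT A =====
-- loop body of A: '+' appended only while cleaned is empty, digits always appended
def pvStepA (acc : List Char) (ch : Char) : List Char :=
  if ch = '+' ∧ acc = [] then acc ++ [ch]
  else if PySem.Chars.isdigit ch then acc ++ [ch]
  else acc

def phone_py (raw : String) : String :=
  let cleaned := (PySem.Str.strip raw).toList.foldl pvStepA []
  let cleaned :=
    if ¬ (PySem.Chars.startswith cleaned ['+'] = true) then
      (if cleaned.length = 10 then '+' :: '9' :: '1' :: cleaned else '+' :: cleaned)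
    else cleaned
  String.ofList cleaned

-- ===== PORT B =====
-- c.isdigit() or c == '+'
def pvFirstSig (c : Char) : Bool := PySem.Chars.isdigit c || c == '+'

-- the break-on-first-significant-char loop of Source B
def pvHasPlus (s : List Char) : Bool :=
  match s.find? pvFirstSig with
  | some c => c == '+'
  | none => false

def phone_py_alt (raw : String) : String :=
  let s := (PySem.Str.strip raw).toList
  let digits := s.filter PySem.Chars.isdigit
  if pvHasPlus s then String.ofList ('+' :: digits)
  else if digits.length = 10 then String.ofList ('+' :: '9' :: '1' :: digits)
  else String.ofList ('+' :: digits)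

-- ===== PRECONDITION & SPEC =====
def Spec_phone_py (raw : String) (out : String) : Prop := out = phone_py_alt raw
instance (raw : String) (out : String) : Decidable (Spec_phone_py raw out) := by unfold Spec_phone_py; infer_instance

-- ===== CLAIM (what is proved, stated in full; the proofs are below) =====
def Claim_equal_phone_py : Prop := ∀ (raw : String), Dom_phone_py raw → Spec_phone_py raw (phone_py raw)

-- ===== LEMMAS AND PROOFS =====
lemma plus_not_digit : PySem.Chars.isdigit '+' = false := by decide

lemma foldA_ne (l : List Char) (acc : List Char) (h : acc ≠ []) :
    l.foldl pvStepA acc = acc ++ l.filter PySem.Chars.isdigit := by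
  induction l generalizing acc with
  | nil => simp
  | cons c l ih =>
    simp only [List.foldl, List.filter]
    have hstep : pvStepA acc c =
        if PySem.Chars.isdigit c then acc ++ [c] else acc := by
      unfold pvStepA
      rw [if_neg]
      rintro ⟨-, h2⟩; exact h h2
    rw [hstep]
    by_cases hd : PySem.Chars.isdigit c
    · rw [if_pos hd, hd, ih _ (by simp)]; simp
    · rw [if_neg hd, ih _ h]
      simp [Bool.eq_false_iff.mpr hd]

lemma foldA_nil (l : List Char) :
    l.foldl pvStepA [] =
      (if pvHasPlus l then '+' :: l.filter PySem.Chars.isdigit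
       else l.filter PySem.Chars.isdigit) := by
  induction l with
  | nil => simp [pvHasPlus]
  | cons c l ih =>
    by_cases hp : c = '+'
    · subst hp
      have h1 : pvStepA [] '+' = ['+'] := by decide
      have h2 : pvHasPlus ('+' :: l) = true := by
        simp [pvHasPlus, List.find?, pvFirstSig]
      simp only [List.foldl, h1, h2, if_pos, foldA_ne l ['+'] (by simp),
        List.filter, plus_not_digit]
      simp
    · by_cases hd : PySem.Chars.isdigit c
      · have h1 : pvStepA [] c = [c] := by
          unfold pvStepA
          rw [if_neg (by rintro ⟨h, -⟩; exact hp h), if_pos hd]; rfl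
        have h2 : pvHasPlus (c :: l) = false := by
          simp [pvHasPlus, List.find?, pvFirstSig, hd, hp]
        simp only [List.foldl, h1, h2, if_neg, Bool.false_eq_true,
          not_false_iff, foldA_ne l [c] (by simp), List.filter, hd]
        simp
      · have h1 : pvStepA [] c = [] := by
          unfold pvStepA
          rw [if_neg (by rintro ⟨h, -⟩; exact hp h), if_neg hd]
        have h2 : pvHasPlus (c :: l) = pvHasPlus l := by
          simp [pvHasPlus, List.find?, pvFirstSig,
            Bool.eq_false_iff.mpr hd, beq_eq_false_iff_ne.mpr hp]
        simp only [List.foldl, h1, h2, ih,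
          List.filter, Bool.eq_false_iff.mpr hd]

lemma digits_no_plus (l : List Char) :
    PySem.Chars.startswith (l.filter PySem.Chars.isdigit) ['+'] = false := by
  rw [Bool.eq_false_iff]
  intro h
  rw [PySem.Chars.startswith_iff] at h
  rcases h with ⟨t, ht⟩
  have : '+' ∈ l.filter PySem.Chars.isdigit := by rw [← ht]; simp
  have := List.of_mem_filter this
  rw [plus_not_digit] at this
  exact Bool.false_ne_true this

-- ===== VERDICT (by name: the statement is the Claim_ definition above) =====
theorem phone_py_spec : Claim_equal_phone_py := by
  intro raw _
  unfold Spec_phone_py phone_py phone_py_alt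
  simp only [foldA_nil, PySem.Str.toList_strip]
  by_cases hp : pvHasPlus (PySem.Chars.strip raw.toList)
  · have : PySem.Chars.startswith
        ('+' :: (PySem.Chars.strip raw.toList).filter PySem.Chars.isdigit) ['+'] = true := by
      rw [PySem.Chars.startswith_iff]; exact ⟨_, rfl⟩
    simp [hp, this]
  · simp only [hp, if_false, Bool.false_eq_true, digits_no_plus, not_false_iff, if_pos]
    split_ifs <;> rfl
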